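-- pv_equiv track=rewrite | github.com/Purra/sdfparser | HeartBeats.py | creatAveragedBeats
-- ===== SOURCE A (Python) =====
-- def creatAveragedBeats(raw_bpm):
--     # Function that makes an structure with the averaged bpm and the timestamp for the recorded bpm
--     j = 1
--     bpm_prev = 0
--     counter = 0
--     doubles = []
--     average = []
--     for bpm in raw_bpm:
--         if bpm != bpm_prev:
--             average.append(bpm)
--             doubles.append(counter)
--             counter = 0;
--             #print "blupp %d" %raw_bpm[j-1]
--         else:
--              counter = counter + 1
--         j = j + 1
--         #print bpm , bpm_prev
--         bpm_prev = bpm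
--     return average,doubles
-- ===== SOURCE B (Python) =====
-- def creatAveragedBeats(raw_bpm):
--     # Phase 1: compress the input into consecutive runs (value, length).
--     runs = []
--     i, n = 0, len(raw_bpm)
--     while i < n:
--         v = raw_bpm[i]
--         j = i
--         while j < n and raw_bpm[j] == v:
--             j += 1
--         runs.append((v, j - i))
--         i = j
--     # Phase 2: one pass over the runs with prev/carry accumulators.
--     average, doubles = [], []
--     prev, carry = 0, 0
--     for v, length in runs:
--         if v != prev:
--             average.append(v)
--             doubles.append(carry)
--             carry = length - 1
--         else:
--             carry = length
--         prev = v
--     return average, doubles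
-- ===== Notes on version B (the rewrite author's own statement) =====
-- stated objective: alternative
-- what changed: B first compresses the input into (value, run-length) groups and then folds over the groups with prev/carry accumulators, deriving each doubles entry from a run length instead of counting element by element.
import Mathlib
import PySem

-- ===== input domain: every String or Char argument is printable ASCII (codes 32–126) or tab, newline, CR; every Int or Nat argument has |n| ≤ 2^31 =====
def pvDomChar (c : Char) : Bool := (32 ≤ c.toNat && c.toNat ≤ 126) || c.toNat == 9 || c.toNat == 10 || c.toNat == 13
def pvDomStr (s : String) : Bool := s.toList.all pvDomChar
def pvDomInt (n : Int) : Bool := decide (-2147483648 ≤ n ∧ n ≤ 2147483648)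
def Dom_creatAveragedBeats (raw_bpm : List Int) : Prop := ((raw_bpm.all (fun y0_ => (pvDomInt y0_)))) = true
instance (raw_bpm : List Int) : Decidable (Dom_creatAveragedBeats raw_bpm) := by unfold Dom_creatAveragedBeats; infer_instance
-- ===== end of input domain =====

-- B replaces A's element-by-element scan with a two-phase pass: compress into (value, run-length)
-- groups, then fold the groups with prev/carry accumulators (objective: alternative decomposition).

-- ===== PORT A =====
-- state = (j, bpm_prev, counter, doubles, average), exactly A's loop variables
def pvStepA (s : Int × Int × Int × List Int × List Int) (bpm : Int) :
    Int × Int × Int × List Int × List Int :=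
  let (j, bpm_prev, counter, doubles, average) := s
  if bpm ≠ bpm_prev then (j + 1, bpm, 0, doubles ++ [counter], average ++ [bpm])
  else (j + 1, bpm, counter + 1, doubles, average)

def creatAveragedBeats (raw_bpm : List Int) : List Int × List Int :=
  let st := raw_bpm.foldl pvStepA (1, 0, 0, [], [])
  (st.2.2.2.2, st.2.2.2.1)

-- ===== PORT B =====
-- phase 1 of Source B: compress into consecutive runs (value, length); pvRunsAux scans one run
-- (v = current value, k = elements of the run seen so far), exactly the inner while loop.
def pvRunsAux (v : Int) (k : Int) : List Int → List (Int × Int)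
  | [] => [(v, k)]
  | x :: t => if x = v then pvRunsAux v (k + 1) t else (v, k) :: pvRunsAux x 1 t

def pvRuns : List Int → List (Int × Int)
  | [] => []
  | x :: t => pvRunsAux x 1 t

-- phase 2 of Source B: state = (prev, carry, average, doubles)
def pvStepB (s : Int × Int × List Int × List Int) (g : Int × Int) :
    Int × Int × List Int × List Int :=
  let (prev, carry, average, doubles) := s
  let (v, length) := g
  if v ≠ prev then (v, length - 1, average ++ [v], doubles ++ [carry])
  else (v, length, average, doubles)

def creatAveragedBeats_alt (raw_bpm : List Int) : List Int × List Int :=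
  let st := (pvRuns raw_bpm).foldl pvStepB (0, 0, [], [])
  (st.2.2.1, st.2.2.2)

-- ===== PRECONDITION & SPEC =====
def Spec_creatAveragedBeats (raw_bpm : List Int) (out : List Int × List Int) : Prop := out = creatAveragedBeats_alt raw_bpm
instance (raw_bpm : List Int) (out : List Int × List Int) : Decidable (Spec_creatAveragedBeats raw_bpm out) := by unfold Spec_creatAveragedBeats; infer_instance

-- ===== CLAIM (what is proved, stated in full; the proofs are below) =====
def Claim_equal_creatAveragedBeats : Prop := ∀ (raw_bpm : List Int), Dom_creatAveragedBeats raw_bpm → Spec_creatAveragedBeats raw_bpm (creatAveragedBeats raw_bpm)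

-- ===== LEMMAS AND PROOFS =====

-- common recursive specification: the (average, doubles) pair still to be produced
-- given current bpm_prev and counter
def pvSpecRec (prev counter : Int) : List Int → List Int × List Int
  | [] => ([], [])
  | x :: t =>
    if x ≠ prev then
      let r := pvSpecRec x 0 t
      (x :: r.1, counter :: r.2)
    else pvSpecRec x (counter + 1) t

-- A's fold appends exactly pvSpecRec to its accumulators
theorem pvFoldA_eq (xs : List Int) : ∀ (j prev c : Int) (dbl avg : List Int),
    (xs.foldl pvStepA (j, prev, c, dbl, avg)).2.2.2 =
      (dbl ++ (pvSpecRec prev c xs).2, avg ++ (pvSpecRec prev c xs).1) := by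
  induction xs with
  | nil => intro j prev c dbl avg; simp [pvSpecRec]
  | cons x t ih =>
    intro j prev c dbl avg
    by_cases h : x = prev
    · simp [pvStepA, pvSpecRec, h, ih]
    · simp [pvStepA, pvSpecRec, h, ih]

-- B's fold over a run started by v (k elements seen, v ≠ prev): the change was already
-- emitted conceptually; result appends v, carry and then pvSpecRec v k of the tail
theorem pvFoldB_run (t : List Int) : ∀ (v : Int) (k : Nat) (prev carry : Int)
    (avg dbl : List Int), v ≠ prev →
    ((pvRunsAux v (↑k + 1) t).foldl pvStepB (prev, carry, avg, dbl)).2.2 =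
      (avg ++ v :: (pvSpecRec v (↑k) t).1, dbl ++ carry :: (pvSpecRec v (↑k) t).2) := by
  induction t with
  | nil => intro v k prev carry avg dbl h; simp [pvRunsAux, pvStepB, pvSpecRec, h]
  | cons x t ih =>
    intro v k prev carry avg dbl h
    by_cases hx : x = v
    · subst hx
      have h1 : (↑k + 1 + 1 : Int) = ↑(k + 1) + 1 := by push_cast; ring
      have h2 : (↑k + 1 : Int) = ↑(k + 1) := by push_cast; ring
      rw [pvRunsAux, if_pos rfl, h1, ih x (k + 1) prev carry avg dbl h,
        pvSpecRec, if_neg (by simp), h2]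
    · rw [pvRunsAux, if_neg hx, List.foldl_cons]
      have hstep : pvStepB (prev, carry, avg, dbl) (v, ↑k + 1) =
          (v, ↑k, avg ++ [v], dbl ++ [carry]) := by
        simp [pvStepB, h]
      rw [hstep]
      have := ih x 0 v (↑k) (avg ++ [v]) (dbl ++ [carry]) hx
      simp only [Nat.cast_zero, zero_add] at this
      rw [this, pvSpecRec, if_pos (by simpa using hx)]
      simp

-- leading zero run: prev = 0 sentinel, the run is absorbed into the counter
theorem pvFoldB_zero (t : List Int) : ∀ (k : Nat) (carry : Int) (avg dbl : List Int),
    ((pvRunsAux 0 (↑k + 1) t).foldl pvStepB (0, carry, avg, dbl)).2.2 =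
      (avg ++ (pvSpecRec 0 (↑k + 1) t).1, dbl ++ (pvSpecRec 0 (↑k + 1) t).2) := by
  induction t with
  | nil => intro k carry avg dbl; simp [pvRunsAux, pvStepB, pvSpecRec]
  | cons x t ih =>
    intro k carry avg dbl
    by_cases hx : x = 0
    · subst hx
      have h2 : (↑k + 1 + 1 : Int) = ↑(k + 1) + 1 := by push_cast; ring
      rw [pvRunsAux, if_pos rfl, h2, ih (k + 1) carry avg dbl,
        pvSpecRec, if_neg (by simp), h2]
    · rw [pvRunsAux, if_neg hx, List.foldl_cons]
      have hstep : pvStepB (0, carry, avg, dbl) ((0 : Int), ((k : Int) + 1)) =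
          ((0 : Int), ((k : Int) + 1), avg, dbl) := by simp [pvStepB]
      rw [hstep]
      have hrun := pvFoldB_run t x 0 0 (↑k + 1) avg dbl hx
      simp only [Nat.cast_zero, zero_add] at hrun
      rw [hrun, pvSpecRec, if_pos (by simpa using hx)]

-- B's whole fold computes pvSpecRec 0 0
theorem pvFoldB_top (xs : List Int) :
    ((pvRuns xs).foldl pvStepB (0, 0, [], [])).2.2 =
      ((pvSpecRec 0 0 xs).1, (pvSpecRec 0 0 xs).2) := by
  match xs with
  | [] => simp [pvRuns, pvSpecRec]
  | x :: t =>
    by_cases hx : x = 0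
    · subst hx
      have h := pvFoldB_zero t 0 0 [] []
      simp only [Nat.cast_zero, zero_add] at h
      rw [pvRuns, h, pvSpecRec, if_neg (by simp)]
      simp
    · have h := pvFoldB_run t x 0 0 0 [] [] hx
      simp only [Nat.cast_zero, zero_add] at h
      rw [pvRuns, h, pvSpecRec, if_pos (by simpa using hx)]
      simp

-- ===== VERDICT (by name: the statement is the Claim_ definition above) =====
theorem creatAveragedBeats_spec : Claim_equal_creatAveragedBeats := by
  intro raw_bpm _
  simp only [Spec_creatAveragedBeats, creatAveragedBeats, creatAveragedBeats_alt]
  rw [pvFoldA_eq raw_bpm 1 0 0 [] [], pvFoldB_top raw_bpm]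
  simp
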